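-- pv_equiv track=rewrite | github.com/jeganpillai/python_reference | p0079_number_of_special_characters.py | count_special_letters
-- ===== SOURCE A (Python) =====
-- def count_special_letters(word):
--     small_set = set()
--     upper_set = set()
--     cnt = 0
--     for i in word:
--         if i.islower():
--             small_set.add(i)
--     for j in word:
--         if j.isupper() and j.lower() in small_set and not j in upper_set:
--             cnt += 1
--             upper_set.add(j)
--     return cnt
-- ===== SOURCE B (Python) =====
-- def count_special_letters(word):
--     return sum(chr(65 + k) in word and chr(97 + k) in word for k in range(26))
-- ===== Notes on version B (the rewrite author's own statement) =====
-- stated objective: alternative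
-- what changed: Instead of scanning the word to build lowercase/uppercase sets and counting with dedup bookkeeping, B iterates over the fixed 26-letter alphabet and counts letters k with chr(65+k) in word and chr(97+k) in word - membership scans of the word, no sets, no per-character Python loop.
import Mathlib
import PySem

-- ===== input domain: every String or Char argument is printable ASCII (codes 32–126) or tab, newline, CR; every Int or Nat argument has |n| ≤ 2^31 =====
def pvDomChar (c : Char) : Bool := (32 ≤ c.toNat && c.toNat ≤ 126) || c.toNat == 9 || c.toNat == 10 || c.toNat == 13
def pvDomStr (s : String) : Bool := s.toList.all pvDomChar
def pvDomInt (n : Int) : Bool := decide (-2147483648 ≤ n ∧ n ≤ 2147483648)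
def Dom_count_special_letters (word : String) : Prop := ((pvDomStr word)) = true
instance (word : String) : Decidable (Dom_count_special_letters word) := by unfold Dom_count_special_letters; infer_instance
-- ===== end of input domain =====

-- B counts over the fixed 26-letter alphabet with membership tests on the word instead of
-- scanning the word and building sets; objective: alternative (same answer by a different traversal).

-- ===== PORT A =====
def count_special_letters (word : String) : Int :=
  let small_set : PySem.Set Char :=
    word.toList.foldl (fun s i => if PySem.Chars.islower i then PySem.Set.add s i else s)
      PySem.Set.empty
  let st : Int × PySem.Set Char :=
    word.toList.foldl
      (fun st j =>
        if PySem.Chars.isupper j && PySem.Set.contains small_set (PySem.Chars.lowerChar j)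
            && !(PySem.Set.contains st.2 j)
        then (st.1 + 1, PySem.Set.add st.2 j)
        else st)
      (0, PySem.Set.empty)
  st.1

-- ===== PORT B =====
-- `chr(65+k) in word` tests a single-character substring, which is exactly membership of
-- that character in the word's character list (exact).
def count_special_letters_alt (word : String) : Int :=
  ((PySem.List.pyRange 0 26).map (fun k =>
      if word.toList.contains (Char.ofNat (65 + k).toNat)
          && word.toList.contains (Char.ofNat (97 + k).toNat)
      then (1 : Int) else 0)).sum

-- ===== PRECONDITION & SPEC =====
def Spec_count_special_letters (word : String) (out : Int) : Prop := out = count_special_letters_alt word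
instance (word : String) (out : Int) : Decidable (Spec_count_special_letters word out) := by unfold Spec_count_special_letters; infer_instance

-- ===== CLAIM (what is proved, stated in full; the proofs are below) =====
def Claim_equal_count_special_letters : Prop := ∀ (word : String), Dom_count_special_letters word → Spec_count_special_letters word (count_special_letters word)

-- ===== LEMMAS AND PROOFS =====

theorem char_le_iff (c d : Char) : (c ≤ d) ↔ c.toNat ≤ d.toNat := ge_iff_le

theorem toNat_ofNat_small (n : Nat) (h : n < 55296) : (Char.ofNat n).toNat = n := by
  have hv : n.isValidChar := Or.inl h
  simp [Char.ofNat, hv, Char.toNat, Char.ofNatAux]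

-- a filtering foldl-add loop is ofList of the filtered list
theorem foldl_add_if_eq_update_filter (p : Char → Bool) (l : List Char) (s : PySem.Set Char) :
    l.foldl (fun s i => if p i then PySem.Set.add s i else s) s
      = PySem.Set.update s (l.filter p) := by
  induction l generalizing s with
  | nil => simp [PySem.Set.update]
  | cons a l ih =>
    by_cases h : p a = true
    · simp [List.foldl, h, ih, PySem.Set.update_cons]
    · simp at h
      simp [List.foldl, h, ih]

theorem foldl_add_if_eq_ofList_filter (p : Char → Bool) (l : List Char) :
    l.foldl (fun s i => if p i then PySem.Set.add s i else s) PySem.Set.empty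
      = PySem.Set.ofList (l.filter p) := by
  rw [foldl_add_if_eq_update_filter]
  exact PySem.Set.update_nil_left _

-- invariant of A's counting loop: it computes the number of NEW elements entering the seen-set
theorem countLoop_invariant (P : Char → Bool) (l : List Char) (c : Int) (s : PySem.Set Char)
    (hs : s.Nodup) :
    l.foldl
      (fun (st : Int × PySem.Set Char) j =>
        if P j && !(PySem.Set.contains st.2 j) then (st.1 + 1, PySem.Set.add st.2 j) else st)
      (c, s)
      = (c + ((PySem.Set.update s (l.filter P)).length - s.length : Int),
          PySem.Set.update s (l.filter P)) := by
  induction l generalizing c s with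
  | nil => simp [PySem.Set.update]
  | cons j l ih =>
    by_cases hP : P j = true
    · by_cases hm : j ∈ s
      · have hc : PySem.Set.contains s j = true := by simp [hm]
        have hadd : PySem.Set.add s j = s := PySem.Set.add_of_mem hm
        simp only [List.foldl, List.filter, hP, hc, Bool.not_true, Bool.and_false, if_neg,
          Bool.false_eq_true, not_false_iff, PySem.Set.update_cons, hadd]
        exact ih c s hs
      · have hc : PySem.Set.contains s j = false := by
          simp [hm]
        have hadd : PySem.Set.add s j = s ++ [j] := PySem.Set.add_of_not_mem hm
        have hnd : (PySem.Set.add s j).Nodup := PySem.Set.nodup_add s j hs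
        simp only [List.foldl, List.filter, hP, hc, Bool.not_false, Bool.and_true, if_pos,
          PySem.Set.update_cons]
        rw [ih (c + 1) _ hnd]
        refine Prod.ext ?_ rfl
        simp only [hadd, List.length_append, List.length_singleton]
        push_cast
        ring
    · simp only [List.foldl, List.filter, hP, Bool.false_and, Bool.false_eq_true,
        if_neg, not_false_iff]
      exact ih c s hs

-- the deduplicated list A effectively counts is, up to permutation, the alphabet positions B counts
theorem key_perm (cs : List Char) :
    (PySem.Set.ofList (cs.filter (fun j => PySem.Chars.isupper j &&
        (PySem.Set.ofList (cs.filter PySem.Chars.islower)).contains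
          (PySem.Chars.lowerChar j)))).Perm
      (((PySem.List.pyRange 0 26).filter (fun k =>
          cs.contains (Char.ofNat (65 + k).toNat)
            && cs.contains (Char.ofNat (97 + k).toNat))).map
        (fun k => Char.ofNat (65 + k).toNat)) := by
  have hrange : PySem.List.pyRange 0 26 = [0,1,2,3,4,5,6,7,8,9,10,11,12,13,14,15,16,17,18,19,20,21,22,23,24,25] := by
    decide
  apply (List.perm_ext_iff_of_nodup (PySem.Set.nodup_ofList _) ?_).mpr
  · intro c
    simp only [PySem.Set.mem_ofList, List.mem_filter, List.mem_map,
      PySem.Chars.isupper, PySem.Chars.lowerChar, char_le_iff,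
      Bool.and_eq_true, decide_eq_true_eq, List.contains_eq_mem]
    constructor
    · rintro ⟨hmem, ⟨hA, hZ⟩, hlow⟩
      have hcA : 65 ≤ c.toNat := hA
      have hcn : c.toNat ≤ 90 := hZ
      rw [if_pos ⟨hA, hZ⟩, PySem.Set.contains_iff, PySem.Set.mem_ofList, List.mem_filter] at hlow
      refine ⟨(c.toNat : Int) - 65, ⟨PySem.List.mem_pyRange_one.mpr (by omega), ?_, ?_⟩, ?_⟩
      · have h1 : (65 + ((c.toNat : Int) - 65)).toNat = c.toNat := by omega
        rw [h1, Char.ofNat_toNat]; exact hmem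
      · have h2 : (97 + ((c.toNat : Int) - 65)).toNat = c.toNat + 32 := by omega
        rw [h2]; exact hlow.1
      · have h1 : (65 + ((c.toNat : Int) - 65)).toNat = c.toNat := by omega
        rw [h1, Char.ofNat_toNat]
    · rintro ⟨k, ⟨hk, h65mem, h97mem⟩, rfl⟩
      rw [PySem.List.mem_pyRange_one] at hk
      obtain ⟨h0, h26⟩ := hk
      have h65 : (65 + k).toNat = 65 + k.toNat := by omega
      have h97 : (97 + k).toNat = 97 + k.toNat := by omega
      have hup : (Char.ofNat (65 + k).toNat).toNat = 65 + k.toNat := by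
        rw [h65]; exact toNat_ofNat_small _ (by omega)
      have hlo : (Char.ofNat (97 + k).toNat).toNat = 97 + k.toNat := by
        rw [h97]; exact toNat_ofNat_small _ (by omega)
      have hA65 : 'A'.toNat = 65 := rfl
      have hZ90 : 'Z'.toNat = 90 := rfl
      have ha97 : 'a'.toNat = 97 := rfl
      have hz122 : 'z'.toNat = 122 := rfl
      refine ⟨h65mem, ⟨by rw [hA65, hup]; omega, by rw [hZ90, hup]; omega⟩, ?_⟩
      rw [if_pos ⟨by rw [hA65, hup]; omega, by rw [hZ90, hup]; omega⟩, PySem.Set.contains_iff, PySem.Set.mem_ofList,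
        List.mem_filter]
      have heq : (Char.ofNat (65 + k).toNat).toNat + 32 = (97 + k).toNat := by omega
      rw [heq]
      refine ⟨h97mem, ?_⟩
      simp only [PySem.Chars.islower, char_le_iff, Bool.and_eq_true, decide_eq_true_eq, hlo,
        ha97, hz122]
      constructor <;> omega
  · refine List.Nodup.map_on ?_ ?_
    · intro x hx y hy hxy
      rw [List.mem_filter, PySem.List.mem_pyRange_one] at hx hy
      have hxN : (65 + x).toNat = 65 + x.toNat := by omega
      have hyN : (65 + y).toNat = 65 + y.toNat := by omega
      have : (Char.ofNat (65 + x).toNat).toNat = (Char.ofNat (65 + y).toNat).toNat := by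
        rw [hxy]
      rw [hxN, hyN, toNat_ofNat_small _ (by omega), toNat_ofNat_small _ (by omega)] at this
      omega
    · exact List.Nodup.filter _ (by rw [hrange]; decide)

-- ===== VERDICT (by name: the statement is the Claim_ definition above) =====
theorem count_special_letters_spec : Claim_equal_count_special_letters := by
  unfold Claim_equal_count_special_letters Spec_count_special_letters
  intro word _
  unfold count_special_letters count_special_letters_alt
  have hloop := countLoop_invariant
    (fun j => PySem.Chars.isupper j &&
      (PySem.Set.ofList (word.toList.filter PySem.Chars.islower)).contains
        (PySem.Chars.lowerChar j))
    word.toList 0 PySem.Set.empty (by simp [PySem.Set.empty])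
  simp only [] at hloop
  simp only [foldl_add_if_eq_ofList_filter]
  rw [hloop]
  rw [PySem.List.sum_map_ite_one_zero, List.countP_eq_length_filter]
  have hlen := (key_perm word.toList).length_eq
  rw [List.length_map] at hlen
  simp only [PySem.Set.empty, PySem.Set.update_nil_left]
  rw [hlen]
  simp
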